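-- pv_equiv track=rewrite | github.com/keatonstrawn/affect_classification_ling_573 | src/data_processor.py | _remove_and_count_punctuation
-- ===== SOURCE A (Python) =====
-- from typing import Optional, Dict, Tuple, List
--
-- def _remove_and_count_punctuation(tweet: str, symbol_list: Optional[List[str]] = None) -> Tuple[str, dict]:
--     """Removes all punctuation from the tweet text and returns the count of the specified punctuation symbols.
--
--     Arguments:
--     ----------
--     tweet
--         The tweet text.
--     symbol_list
--         The list of punctuation symbols for which to keep count.
--
--     Returns:
--     --------
--     a tuple of the tweet text, with punctuation removed, and a separate dictionary of the counts for the symbols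
--     specified in symbol_list.
--     """
--
--     # Fill in default symbols, if missing
--     if symbol_list is None:
--         symbol_list = ('!', '?', '$', '*')
--
--     cleaned_tweet = ''
--     symbol_counts = {f'{s}_count': [0] for s in symbol_list}
--     for char in tweet:
--         if char in symbol_list:
--             symbol_counts[f'{char}_count'][0] += 1
--         else:
--             cleaned_tweet += char
--
--     return cleaned_tweet, symbol_counts
-- ===== SOURCE B (Python) =====
-- def _remove_and_count_punctuation(tweet, symbol_list=None):
--     """Removes all punctuation from the tweet text and returns the count of the specified punctuation symbols."""
--     if symbol_list is None:
--         symbol_list = ('!', '?', '$', '*')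
--     char_counts = {}
--     for c in tweet:
--         char_counts[c] = char_counts.get(c, 0) + 1
--     symbol_set = set(symbol_list)
--     cleaned_tweet = ''.join(c for c in tweet if c not in symbol_set)
--     symbol_counts = {f'{s}_count': [char_counts.get(s, 0)] for s in symbol_list}
--     return cleaned_tweet, symbol_counts
-- ===== Notes on version B (the rewrite author's own statement) =====
-- stated objective: faster
-- what changed: Replaces A's single interleaved loop (per-character membership scan of symbol_list plus in-place mutation of the counts dict while concatenating the cleaned string) with a character histogram built once, a set for membership, one filtering pass for the cleaned tweet, and a per-symbol histogram lookup to build the counts dict.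
import Mathlib
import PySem

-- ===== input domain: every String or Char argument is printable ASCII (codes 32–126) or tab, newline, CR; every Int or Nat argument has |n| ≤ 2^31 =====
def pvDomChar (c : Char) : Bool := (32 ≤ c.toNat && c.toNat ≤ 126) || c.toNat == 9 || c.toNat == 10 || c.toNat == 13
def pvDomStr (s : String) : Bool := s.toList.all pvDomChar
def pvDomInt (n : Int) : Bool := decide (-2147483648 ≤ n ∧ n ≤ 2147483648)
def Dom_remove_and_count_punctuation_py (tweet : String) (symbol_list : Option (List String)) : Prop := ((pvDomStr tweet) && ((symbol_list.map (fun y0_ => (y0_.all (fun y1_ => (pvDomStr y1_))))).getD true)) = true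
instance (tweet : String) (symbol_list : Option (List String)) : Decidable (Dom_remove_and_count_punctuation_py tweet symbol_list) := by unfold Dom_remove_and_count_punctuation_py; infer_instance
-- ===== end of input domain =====

-- B replaces A's single interleaved loop (per-character symbol_list scan, in-place counts-dict
-- mutation, string concatenation) with a character histogram built once, a set for membership,
-- one filtering pass for the cleaned tweet, and per-symbol histogram lookups; objective: faster
-- (measured), same exact return value.

-- shared key format f'{s}_count'
def pvKey (s : String) : String := s ++ "_count"

-- list[0] += 1 on the stored singleton list (Python raises on [], which never occurs: every stored list is non-empty)
def pvInc : List Int → List Int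
  | x :: r => (x + 1) :: r
  | [] => []

-- ===== PORT A =====
-- dict access symbol_counts[f'{char}_count'] is ported with Dict.modify: the key is always present
-- (it was initialised for every s in symbol_list), so Python's KeyError path is unreachable and
-- modify is exact here.
def remove_and_count_punctuation_py (tweet : String) (symbol_list : Option (List String)) : String × (List (String × List Int)) :=
  let syms : List String := match symbol_list with | none => ["!", "?", "$", "*"] | some l => l
  let init : PySem.Dict String (List Int) :=
    syms.foldl (fun d s => d.insert (pvKey s) ([0] : List Int)) PySem.Dict.empty
  let res : List Char × PySem.Dict String (List Int) :=
    tweet.toList.foldl (fun st c =>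
      if syms.contains (String.mk [c]) then
        (st.1, st.2.modify (pvKey (String.mk [c])) [0] pvInc)
      else
        (st.1 ++ [c], st.2)) ([], init)
  (String.mk res.1, res.2.items)

-- ===== PORT B =====
def remove_and_count_punctuation_py_alt (tweet : String) (symbol_list : Option (List String)) : String × (List (String × List Int)) :=
  let syms : List String := match symbol_list with | none => ["!", "?", "$", "*"] | some l => l
  let char_counts : PySem.Dict String Int :=
    tweet.toList.foldl (fun d c => d.insert (String.mk [c]) (d.getD (String.mk [c]) 0 + 1)) PySem.Dict.empty
  let symbol_set : PySem.Set String := PySem.Set.ofList syms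
  let cleaned : String := String.mk (tweet.toList.filter (fun c => !(symbol_set.contains (String.mk [c]))))
  let counts : PySem.Dict String (List Int) :=
    syms.foldl (fun d s => d.insert (pvKey s) ([char_counts.getD s 0])) PySem.Dict.empty
  (cleaned, counts.items)

-- ===== PRECONDITION & SPEC =====
def Spec_remove_and_count_punctuation_py (tweet : String) (symbol_list : Option (List String)) (out : String × (List (String × List Int))) : Prop := out = remove_and_count_punctuation_py_alt tweet symbol_list
instance (tweet : String) (symbol_list : Option (List String)) (out : String × (List (String × List Int))) : Decidable (Spec_remove_and_count_punctuation_py tweet symbol_list out) := by unfold Spec_remove_and_count_punctuation_py; infer_instance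

-- ===== CLAIM (what is proved, stated in full; the proofs are below) =====
def Claim_equal_remove_and_count_punctuation_py : Prop := ∀ (tweet : String) (symbol_list : Option (List String)), Dom_remove_and_count_punctuation_py tweet symbol_list → Spec_remove_and_count_punctuation_py tweet symbol_list (remove_and_count_punctuation_py tweet symbol_list)

-- ===== LEMMAS AND PROOFS =====

theorem pvKey_inj {s t : String} (h : pvKey s = pvKey t) : s = t :=
  (String.append_left_inj "_count").mp h

-- A's pair fold splits into the filtering pass and a pure dict fold
theorem pvPairSplit (syms : List String) : ∀ (cs acc : List Char) (d : PySem.Dict String (List Int)),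
    cs.foldl (fun st c =>
      if syms.contains (String.mk [c]) then
        (st.1, st.2.modify (pvKey (String.mk [c])) [0] pvInc)
      else
        (st.1 ++ [c], st.2)) (acc, d)
    = (acc ++ cs.filter (fun c => !(syms.contains (String.mk [c]))),
       cs.foldl (fun d c =>
         if syms.contains (String.mk [c]) then
           PySem.Dict.modify d (pvKey (String.mk [c])) [0] pvInc
         else d) d) := by
  intro cs
  induction cs with
  | nil => simp
  | cons c cs ih =>
    intro acc d
    by_cases h : syms.contains (String.mk [c]) = true
    · rw [List.foldl_cons, if_pos h, ih, List.foldl_cons, if_pos h,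
        List.filter_cons_of_neg (by rw [h]; decide)]
    · have h' : syms.contains (String.mk [c]) = false := Bool.not_eq_true _ ▸ h
      rw [List.foldl_cons, if_neg h, ih, List.foldl_cons, if_neg h,
        List.filter_cons_of_pos (by rw [h']; decide)]
      simp

-- the dict fold over the tweet preserves the key list (every modified key is already present)
theorem pvCharFold_keys (syms : List String) : ∀ (cs : List Char) (d : PySem.Dict String (List Int)),
    (∀ c : Char, syms.contains (String.mk [c]) = true → pvKey (String.mk [c]) ∈ d.keys) →
    (cs.foldl (fun d c =>
      if syms.contains (String.mk [c]) then
        PySem.Dict.modify d (pvKey (String.mk [c])) [0] pvInc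
      else d) d).keys = d.keys := by
  intro cs
  induction cs with
  | nil => intro d _; rfl
  | cons c cs ih =>
    intro d hd
    by_cases h : syms.contains (String.mk [c]) = true
    · have hk : (PySem.Dict.modify d (pvKey (String.mk [c])) [0] pvInc).keys = d.keys := by
        rw [PySem.Dict.keys_modify]
        exact PySem.Dict.keys_insert_of_contains d _
          ((PySem.Dict.contains_iff_mem_keys d _).mpr (hd c h))
      rw [List.foldl_cons, if_pos h, ih _ (fun c' hc' => hk ▸ hd c' hc'), hk]
    · rw [List.foldl_cons, if_neg h]
      exact ih d hd
-- value at a present key after the dict fold: head increased by the matching-character count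
theorem pvCharFold_getD (syms : List String) (k : String) : ∀ (cs : List Char)
    (d : PySem.Dict String (List Int)) (x : Int) (t : List Int),
    d.getD k [0] = x :: t →
    (cs.foldl (fun d c =>
      if syms.contains (String.mk [c]) then
        PySem.Dict.modify d (pvKey (String.mk [c])) [0] pvInc
      else d) d).getD k [0]
    = (x + ((cs.countP (fun c => syms.contains (String.mk [c]) && (pvKey (String.mk [c]) == k)) : Nat) : Int)) :: t := by
  intro cs
  induction cs with
  | nil => intro d x t h; simpa using h
  | cons c cs ih =>
    intro d x t h
    by_cases hm : syms.contains (String.mk [c]) = true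
    · by_cases hk : pvKey (String.mk [c]) = k
      · have h1 : (PySem.Dict.modify d (pvKey (String.mk [c])) [0] pvInc).getD k [0] = (x + 1) :: t := by
          rw [← hk] at h ⊢
          rw [PySem.Dict.getD_modify_self, h]
          rfl
        have hp : (fun c => syms.contains (String.mk [c]) && (pvKey (String.mk [c]) == k)) c = true := by
          simp only [hm, hk, Bool.true_and, beq_self_eq_true]
        rw [List.foldl_cons, if_pos hm, ih _ _ _ h1]
        simp only [List.countP_cons, hp, if_true]
        congr 1
        push_cast
        ring
      · have h1 : (PySem.Dict.modify d (pvKey (String.mk [c])) [0] pvInc).getD k [0] = x :: t := by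
          rw [PySem.Dict.getD_modify_of_ne d _ _ (fun he => hk he.symm), h]
        have hp : (fun c => syms.contains (String.mk [c]) && (pvKey (String.mk [c]) == k)) c = false := by
          simp only [hm, Bool.true_and]
          simpa using hk
        rw [List.foldl_cons, if_pos hm, ih _ _ _ h1]
        simp only [List.countP_cons, hp, Bool.false_eq_true, if_false, Nat.add_zero]
    · have hp : (fun c => syms.contains (String.mk [c]) && (pvKey (String.mk [c]) == k)) c = false := by
        simp only [Bool.not_eq_true _ ▸ hm, Bool.false_and]
      rw [List.foldl_cons, if_neg hm, ih _ _ _ h]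
      simp only [List.countP_cons, hp, Bool.false_eq_true, if_false, Nat.add_zero]

-- an insert fold of fresh-for-k keys leaves getD at k unchanged
theorem pvFoldInsert_getD_of_ne (g : String → List Int) : ∀ (l : List String)
    (d : PySem.Dict String (List Int)) (k : String),
    (∀ u ∈ l, pvKey u ≠ k) →
    (l.foldl (fun d s => d.insert (pvKey s) (g s)) d).getD k [0] = d.getD k [0] := by
  intro l
  induction l with
  | nil => intro d k _; rfl
  | cons s l ih =>
    intro d k hl
    rw [List.foldl_cons, ih _ _ (fun u hu => hl u (List.mem_cons_of_mem _ hu)),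
      PySem.Dict.getD_insert_of_ne _ _ _ (fun he => hl s (List.mem_cons_self) he.symm)]

-- an insert fold evaluated at one of its own keys
theorem pvFoldInsert_getD_mem (g : String → List Int) : ∀ (l : List String)
    (d : PySem.Dict String (List Int)) (s : String), s ∈ l →
    (l.foldl (fun d s => d.insert (pvKey s) (g s)) d).getD (pvKey s) [0] = g s := by
  intro l
  induction l with
  | nil => intro d s h; cases h
  | cons u l ih =>
    intro d s hs
    by_cases hmem : s ∈ l
    · rw [List.foldl_cons]; exact ih _ _ hmem
    · have hsu : s = u := by
        rcases List.mem_cons.mp hs with h | h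
        · exact h
        · exact absurd h hmem
      subst hsu
      rw [List.foldl_cons,
        pvFoldInsert_getD_of_ne g l _ _ (fun v hv he => hmem (by rw [← pvKey_inj he]; exact hv)),
        PySem.Dict.getD_insert_self]

-- the central equality, for an arbitrary resolved symbol list
theorem pvMain (tweet : String) (syms : List String) :
    (String.mk (tweet.toList.foldl (fun st c =>
        if syms.contains (String.mk [c]) then
          (st.1, st.2.modify (pvKey (String.mk [c])) [0] pvInc)
        else
          (st.1 ++ [c], st.2))
        (([] : List Char), syms.foldl (fun d s => d.insert (pvKey s) ([0] : List Int)) PySem.Dict.empty)).1,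
     (tweet.toList.foldl (fun st c =>
        if syms.contains (String.mk [c]) then
          (st.1, st.2.modify (pvKey (String.mk [c])) [0] pvInc)
        else
          (st.1 ++ [c], st.2))
        (([] : List Char), syms.foldl (fun d s => d.insert (pvKey s) ([0] : List Int)) PySem.Dict.empty)).2.items)
    = (String.mk (tweet.toList.filter (fun c =>
          !((PySem.Set.ofList syms).contains (String.mk [c])))),
       (syms.foldl (fun d s =>
          d.insert (pvKey s)
            ([(tweet.toList.foldl (fun d c =>
                d.insert (String.mk [c]) (d.getD (String.mk [c]) 0 + 1)) PySem.Dict.empty).getD s 0])) PySem.Dict.empty).items) := by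
  rw [pvPairSplit]
  set d0 : PySem.Dict String (List Int) :=
    syms.foldl (fun d s => d.insert (pvKey s) ([0] : List Int)) PySem.Dict.empty with hd0
  set dA : PySem.Dict String (List Int) :=
    tweet.toList.foldl (fun d c =>
      if syms.contains (String.mk [c]) then
        PySem.Dict.modify d (pvKey (String.mk [c])) [0] pvInc
      else d) d0 with hdA
  set cc : PySem.Dict String Int :=
    tweet.toList.foldl (fun d c => d.insert (String.mk [c]) (d.getD (String.mk [c]) 0 + 1)) PySem.Dict.empty with hcc
  set dB : PySem.Dict String (List Int) :=
    syms.foldl (fun d s => d.insert (pvKey s) ([cc.getD s 0])) PySem.Dict.empty with hdB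
  have hccCounter : cc = PySem.Dict.counter (tweet.toList.map (fun c => String.mk [c])) := by
    rw [hcc, ← PySem.Dict.foldl_insert_getD_add_one_eq_counter, List.foldl_map]
  have hccGetD : ∀ s : String, cc.getD s 0 = ((tweet.toList.countP (fun c => String.mk [c] == s) : Nat) : Int) := by
    intro s
    rw [hccCounter, PySem.Dict.getD_counter]
    congr 1
    simp [List.count_eq_countP, List.countP_map]
    rfl
  have hk0 : d0.keys = PySem.Set.update (PySem.Dict.keys (ν := List Int) PySem.Dict.empty) (syms.map pvKey) :=
    PySem.Dict.keys_foldl_insert_key syms pvKey (fun _ s => ([0] : List Int)) PySem.Dict.empty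
  have hkB : dB.keys = PySem.Set.update (PySem.Dict.keys (ν := List Int) PySem.Dict.empty) (syms.map pvKey) :=
    PySem.Dict.keys_foldl_insert_key syms pvKey (fun _ s => ([cc.getD s 0])) PySem.Dict.empty
  have hmem0 : ∀ k, k ∈ d0.keys ↔ ∃ s ∈ syms, k = pvKey s := by
    intro k
    rw [hk0]
    constructor
    · intro h
      rcases (PySem.Set.mem_update _ _ _).mp h with h | h
      · simp [PySem.Dict.keys_empty] at h
      · rcases List.mem_map.mp h with ⟨s, hs, he⟩
        exact ⟨s, hs, he.symm⟩
    · intro ⟨s, hs, he⟩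
      exact (PySem.Set.mem_update _ _ _).mpr (Or.inr (he ▸ List.mem_map_of_mem hs))
  have hkA : dA.keys = d0.keys := by
    apply pvCharFold_keys
    intro c hc
    exact (hmem0 _).mpr ⟨String.mk [c], List.mem_of_elem_eq_true hc, rfl⟩
  have hnd0 : d0.keys.Nodup :=
    PySem.Dict.nodup_keys_foldl_insert_key syms pvKey _ PySem.Dict.empty PySem.Dict.nodup_keys_empty
  have hndB : dB.keys.Nodup :=
    PySem.Dict.nodup_keys_foldl_insert_key syms pvKey _ PySem.Dict.empty PySem.Dict.nodup_keys_empty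
  have hitems : dA.items = dB.items := by
    rw [PySem.Dict.items_eq_map_keys dA (hkA ▸ hnd0) ([0] : List Int),
      PySem.Dict.items_eq_map_keys dB hndB ([0] : List Int), hkA, hk0, ← hkB]
    apply List.map_congr_left
    intro k hk
    have hk' : k ∈ d0.keys := by rw [hk0, ← hkB]; exact hk
    rcases (hmem0 k).mp hk' with ⟨s, hs, he⟩
    subst he
    have hA0 : d0.getD (pvKey s) [0] = ([0] : List Int) :=
      pvFoldInsert_getD_mem (fun _ => ([0] : List Int)) syms PySem.Dict.empty s hs
    have hA : dA.getD (pvKey s) [0]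
        = ((0 : Int) + ((tweet.toList.countP (fun c => syms.contains (String.mk [c]) && (pvKey (String.mk [c]) == pvKey s)) : Nat) : Int)) :: ([] : List Int) :=
      pvCharFold_getD syms (pvKey s) tweet.toList d0 0 [] hA0
    have hB : dB.getD (pvKey s) [0] = [cc.getD s 0] :=
      pvFoldInsert_getD_mem _ syms PySem.Dict.empty s hs
    have hcount : tweet.toList.countP (fun c => syms.contains (String.mk [c]) && (pvKey (String.mk [c]) == pvKey s))
        = tweet.toList.countP (fun c => String.mk [c] == s) := by
      apply List.countP_congr
      intro c _
      by_cases hcs : String.mk [c] = s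
      · simp [hcs, hs]
      · have h2 : (pvKey (String.mk [c]) == pvKey s) = false :=
          beq_eq_false_iff_ne.mpr (fun he => hcs (pvKey_inj he))
        rw [h2, Bool.and_false]
        simp [hcs]
    rw [hA, hB, hcount, hccGetD s]
    simp
  have hfilter : tweet.toList.filter (fun c => !(syms.contains (String.mk [c])))
      = tweet.toList.filter (fun c => !((PySem.Set.ofList syms).contains (String.mk [c]))) := by
    apply List.filter_congr
    intro c _
    have : (PySem.Set.ofList syms).contains (String.mk [c]) = syms.contains (String.mk [c]) := by
      simp [pysem]
    rw [this]
  rw [hitems, hfilter]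
  simp

-- ===== VERDICT (by name: the statement is the Claim_ definition above) =====
theorem remove_and_count_punctuation_py_spec : Claim_equal_remove_and_count_punctuation_py := by
  intro tweet symbol_list _
  unfold Spec_remove_and_count_punctuation_py
  cases symbol_list with
  | none =>
    simp only [remove_and_count_punctuation_py, remove_and_count_punctuation_py_alt]
    exact pvMain tweet ["!", "?", "$", "*"]
  | some l =>
    simp only [remove_and_count_punctuation_py, remove_and_count_punctuation_py_alt]
    exact pvMain tweet l
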